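-- pv_equiv track=rewrite | github.com/hellojixian/stock-dummy | research-v10/r9.py | _calc_down_days
-- ===== SOURCE A (Python) =====
-- def _calc_down_days(values):
--     values = list(values)
--     values.reverse()
--
--     days = 0
--     for i in range(len(values)):
--         v=values[i]
--         if v>0: break
--         days+=1
--     return days
-- ===== SOURCE B (Python) =====
-- def _calc_down_days(values):
--     vs = list(values)
--     last_pos = -1
--     for i, v in enumerate(vs):
--         if v > 0:
--             last_pos = i
--     return len(vs) - last_pos - 1
-- ===== Notes on version B (the rewrite author's own statement) =====
-- stated objective: alternative
-- what changed: Forward pass maintaining the index of the last strictly-positive element and returning len - last_pos - 1, instead of reversing the list and counting with an early break.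
import Mathlib
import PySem

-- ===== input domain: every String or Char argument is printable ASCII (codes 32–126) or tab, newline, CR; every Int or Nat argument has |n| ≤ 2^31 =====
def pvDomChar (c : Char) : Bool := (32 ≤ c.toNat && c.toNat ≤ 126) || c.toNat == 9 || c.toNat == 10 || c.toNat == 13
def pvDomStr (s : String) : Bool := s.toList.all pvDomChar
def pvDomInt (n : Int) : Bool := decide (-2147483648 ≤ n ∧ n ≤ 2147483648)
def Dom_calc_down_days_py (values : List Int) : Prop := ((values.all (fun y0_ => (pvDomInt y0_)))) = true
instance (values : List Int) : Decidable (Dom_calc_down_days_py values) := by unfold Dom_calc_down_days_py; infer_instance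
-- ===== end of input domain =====

-- B replaces A's reverse-then-count-with-break by a forward pass tracking the last
-- strictly-positive index and a closed-form subtraction (alternative decomposition, same cost).


-- ===== PORT A =====
-- the for-loop with `break`: consume the reversed list, stopping at the first v > 0
def calcDownDaysLoop (vs : List Int) : Int :=
  match vs with
  | [] => 0
  | v :: rest => if v > 0 then 0 else 1 + calcDownDaysLoop rest

def calc_down_days_py (values : List Int) : Int :=
  calcDownDaysLoop values.reverse

-- ===== PORT B =====
-- forward pass over enumerate(vs) updating last_pos, then len - last_pos - 1
def calc_down_days_py_alt (values : List Int) : Int :=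
  let last_pos : Int :=
    values.zipIdx.foldl (fun lp (p : Int × Nat) => if p.1 > 0 then (p.2 : Int) else lp) (-1)
  (values.length : Int) - last_pos - 1

-- ===== PRECONDITION & SPEC =====
def Spec_calc_down_days_py (values : List Int) (out : Int) : Prop := out = calc_down_days_py_alt values
instance (values : List Int) (out : Int) : Decidable (Spec_calc_down_days_py values out) := by unfold Spec_calc_down_days_py; infer_instance

-- ===== CLAIM (what is proved, stated in full; the proofs are below) =====
def Claim_equal_calc_down_days_py : Prop := ∀ (values : List Int), Dom_calc_down_days_py values → Spec_calc_down_days_py values (calc_down_days_py values)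

-- ===== LEMMAS AND PROOFS =====

theorem calc_down_days_eq (values : List Int) :
    calcDownDaysLoop values.reverse = calc_down_days_py_alt values := by
  induction values using List.reverseRecOn with
  | nil => decide
  | append_singleton xs x ih =>
      simp only [calc_down_days_py_alt, List.zipIdx_append, List.foldl_append,
        List.reverse_append, List.reverse_singleton, List.singleton_append,
        calcDownDaysLoop, List.zipIdx_singleton, List.foldl_cons, List.foldl_nil,
        List.length_append, List.length_singleton] at *
      by_cases hx : x > 0
      · simp [hx]
      · simp only [hx, if_false, ih]
        push_cast
        ring

-- ===== VERDICT (by name: the statement is the Claim_ definition above) =====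
theorem calc_down_days_py_spec : Claim_equal_calc_down_days_py := by
  intro values _
  show calc_down_days_py values = calc_down_days_py_alt values
  exact calc_down_days_eq values
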